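-- pv_equiv track=rewrite | github.com/aeebbr/Algorithm | 2023/09/week01/prog_121683_외톨이알파벳.py | solution
-- ===== SOURCE A (Python) =====
-- def solution(input_string):
--     answer = []
--     # alpha = list(set(input_string))
--     dic = {}
--
--     for i in range(len(input_string)):
--         alpha = input_string[i]
--         if not alpha in answer:
--             if alpha in dic:
--                 # 이미 있다면 그 인덱스가 내 이전 인덱스인지 확인
--                 pre = dic[alpha]
--                 if pre == i - 1:
--                     # 맞다면 갱신
--                     dic[alpha] = i
--                 else:
--                     answer.append(alpha)
--             else:
--                 dic[alpha] = i
--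
--     answer.sort()
--     result = ''
--     for j in answer:
--         result += j
--
--     if result == "":
--         return 'N'
--     else:
--         return result
-- ===== SOURCE B (Python) =====
-- def solution(input_string):
--     # compress the string into one representative per maximal run of equal characters
--     heads = []
--     prev = None
--     for c in input_string:
--         if c != prev:
--             heads.append(c)
--         prev = c
--     # count how many runs each character heads
--     counts = {}
--     for c in heads:
--         counts[c] = counts.get(c, 0) + 1
--     # characters heading at least two runs are the "lonely" ones
--     lonely = sorted(c for c in counts if counts[c] >= 2)
--     return ''.join(lonely) or 'N'
-- ===== Notes on version B (the rewrite author's own statement) =====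
-- stated objective: simpler
-- what changed: A's online state machine (dict of each character's last first-run index plus an adjacency test pre == i-1) is replaced by run-compression: collapse the string to one representative per maximal run, count runs per character in a dict, and keep the characters heading at least two runs.
import Mathlib
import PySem

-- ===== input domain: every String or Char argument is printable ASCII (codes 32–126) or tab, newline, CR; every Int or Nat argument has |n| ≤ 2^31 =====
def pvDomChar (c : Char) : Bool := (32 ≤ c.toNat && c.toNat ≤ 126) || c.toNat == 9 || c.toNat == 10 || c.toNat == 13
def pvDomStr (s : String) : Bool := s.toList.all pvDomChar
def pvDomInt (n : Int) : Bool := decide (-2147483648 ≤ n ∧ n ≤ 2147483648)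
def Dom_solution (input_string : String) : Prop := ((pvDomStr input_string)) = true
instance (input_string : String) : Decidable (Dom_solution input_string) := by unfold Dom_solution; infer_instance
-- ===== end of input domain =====

-- B replaces A's online last-index/adjacency state machine by run-compression + run counting (simpler); return value only, A mutates nothing observable.

-- ===== PORT A =====
-- one loop step: alpha at index i, state (answer, dic)
def pvStepA (st : List Char × PySem.Dict Char Int) (ic : Int × Char) : List Char × PySem.Dict Char Int :=
  if st.1.contains ic.2 then st
  else
    match (st.2).get? ic.2 with
    | some pre => if pre == ic.1 - 1 then (st.1, (st.2).insert ic.2 ic.1) else (st.1 ++ [ic.2], st.2)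
    | none => (st.1, (st.2).insert ic.2 ic.1)

-- 'for i in range(len(s)): alpha = s[i]' iterated as enumerate over the characters — identical since i runs over exactly all indices
def solution (input_string : String) : String :=
  let st := (PySem.List.enumerate input_string.toList 0).foldl pvStepA ([], PySem.Dict.empty)
  let answer := PySem.List.sorted st.1 (fun x => x) false      -- answer.sort()
  let result := answer.foldl (fun r j => r ++ [j]) ([] : List Char)   -- result += j, on the char-list side
  if result = [] then "N" else String.mk result

-- ===== PORT B =====
-- heads/prev loop of Source B; prev starts as None, 'c != prev' is 'some c ≠ prev'
def pvRunState (l : List Char) : List Char × Option Char :=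
  l.foldl (fun hp c => (if some c ≠ hp.2 then hp.1 ++ [c] else hp.1, some c)) ([], none)

def solution_alt (input_string : String) : String :=
  let heads := (pvRunState input_string.toList).1
  let counts := heads.foldl (fun d c => d.insert c (d.getD c 0 + 1)) (PySem.Dict.empty : PySem.Dict Char Int)  -- counts[c] = counts.get(c, 0) + 1
  -- counts[c] ported as getD c 0: every c iterated is a key of counts
  let lonely := PySem.List.sorted ((counts.keys).filter (fun c => 2 ≤ counts.getD c 0)) (fun x => x) false
  let res := PySem.Chars.join [] (lonely.map (fun c => [c]))   -- ''.join(lonely)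
  if res = [] then "N" else String.mk res

-- ===== PRECONDITION & SPEC =====
def Spec_solution (input_string : String) (out : String) : Prop := out = solution_alt input_string
instance (input_string : String) (out : String) : Decidable (Spec_solution input_string out) := by unfold Spec_solution; infer_instance

-- ===== CLAIM (what is proved, stated in full; the proofs are below) =====
def Claim_equal_solution : Prop := ∀ (input_string : String), Dom_solution input_string → Spec_solution input_string (solution input_string)

-- ===== LEMMAS AND PROOFS =====

-- ===== VERDICT (by name: the statement is the Claim_ definition above) =====
-- ===== LEMMAS AND PROOFS =====

theorem pvRunState_append (p : List Char) (a : Char) :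
    pvRunState (p ++ [a]) =
      (if some a ≠ (pvRunState p).2 then (pvRunState p).1 ++ [a] else (pvRunState p).1, some a) := by
  unfold pvRunState
  rw [List.foldl_append]
  rfl

theorem pvRunState_snd (p : List Char) : (pvRunState p).2 = p.getLast? := by
  induction p using List.reverseRecOn with
  | nil => rfl
  | append_singleton p a _ => rw [pvRunState_append]; simp

theorem pvHeads_append (p : List Char) (a : Char) :
    (pvRunState (p ++ [a])).1 =
      if p.getLast? = some a then (pvRunState p).1 else (pvRunState p).1 ++ [a] := by
  rw [pvRunState_append, pvRunState_snd]
  by_cases h : p.getLast? = some a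
  · simp [h]
  · simp [h, Ne.symm h]
  -- note: condition 'some a ≠ getLast? p' flips to 'getLast? p = some a'

theorem pvMem_heads (p : List Char) (c : Char) : c ∈ (pvRunState p).1 ↔ c ∈ p := by
  induction p using List.reverseRecOn with
  | nil => rfl
  | append_singleton p a ih =>
    rw [pvHeads_append]
    by_cases h : p.getLast? = some a
    · have ha : a ∈ p := List.mem_of_getLast? h
      simp only [if_pos h, ih, List.mem_append, List.mem_singleton]
      constructor
      · exact fun hc => Or.inl hc
      · rintro (hc | rfl)
        · exact hc
        · exact ha
    · simp [h, ih]

theorem pvCount_heads_append (p : List Char) (a c : Char) :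
    ((pvRunState (p ++ [a])).1).count c =
      ((pvRunState p).1).count c +
        (if p.getLast? = some a then 0 else if c = a then 1 else 0) := by
  rw [pvHeads_append]
  by_cases h : p.getLast? = some a
  · simp [h]
  · rw [if_neg h, List.count_append]
    by_cases hca : c = a
    · subst hca; simp [h]
    · simp [hca, Ne.symm hca]

-- the loop invariant of A's fold over the prefix p
def pvInvA (p : List Char) (st : List Char × PySem.Dict Char Int) : Prop :=
  st.1.Nodup ∧
  (∀ c, c ∈ st.1 ↔ 2 ≤ ((pvRunState p).1).count c) ∧
  (∀ c, st.2.contains c = decide (c ∈ p)) ∧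
  (∀ c v, st.2.get? c = some v → v ≤ (p.length : Int) - 1) ∧
  (∀ c, st.2.get? c = some ((p.length : Int) - 1) ↔
        (p.getLast? = some c ∧ ((pvRunState p).1).count c = 1))

theorem pvInvA_fold (l : List Char) :
    pvInvA l ((PySem.List.enumerate l 0).foldl pvStepA ([], PySem.Dict.empty)) := by
  induction l using List.reverseRecOn with
  | nil =>
    refine ⟨List.nodup_nil, by simp [pvRunState], by simp, by simp, by simp [pvRunState]⟩
  | append_singleton p a ih =>
    rw [PySem.List.enumerate_append, List.foldl_append]
    obtain ⟨hn, hm, hc, hb, he⟩ := ih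
    set st := (PySem.List.enumerate p 0).foldl pvStepA ([], PySem.Dict.empty) with hst
    have hfold : (PySem.List.enumerate [a] (0 + ↑p.length)).foldl pvStepA st
        = pvStepA st ((p.length : Int), a) := by
      simp [PySem.List.enumerate]
    rw [hfold]
    have hlen : ((p ++ [a]).length : Int) - 1 = (p.length : Int) := by
      simp [List.length_append]
    have hlast' : (p ++ [a]).getLast? = some a := by simp
    by_cases h2 : 2 ≤ ((pvRunState p).1).count a
    · -- alpha already in answer: the step is a no-op
      have hmem : a ∈ st.1 := (hm a).mpr h2
      have hcont : st.1.contains a = true := by simpa using hmem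
      have haP : a ∈ p := (pvMem_heads p a).mp (List.count_pos_iff.mp (by omega))
      unfold pvStepA
      rw [if_pos hcont]
      refine ⟨hn, ?_, ?_, ?_, ?_⟩
      · intro c
        rw [hm c, pvCount_heads_append]
        by_cases hca : c = a
        · subst hca
          refine iff_of_true h2 ?_
          split_ifs <;> omega
        · simp [hca]
      · intro c
        rw [hc c]
        by_cases hca : c = a
        · subst hca; simp [haP]
        · simp [hca]
      · intro c v hv
        have := hb c v hv
        rw [hlen]; omega
      · intro c
        rw [hlen]
        constructor
        · intro hv
          have := hb c _ hv; omega
        · rintro ⟨hl, hcnt⟩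
          have hca : c = a := by rw [hlast'] at hl; exact (Option.some.inj hl).symm
          subst hca
          rw [pvCount_heads_append] at hcnt
          split_ifs at hcnt <;> omega
    · -- alpha not yet in answer
      have hmem : a ∉ st.1 := fun h => h2 ((hm a).mp h)
      have hcont : ¬ st.1.contains a = true := by simpa using hmem
      unfold pvStepA
      rw [if_neg hcont]
      cases hga : st.2.get? a with
      | none =>
        have haP : a ∉ p := by
          have h' := hc a
          rw [PySem.Dict.contains_eq_isSome_get?, hga] at h'
          simpa using h'.symm
        have hlastne : p.getLast? ≠ some a := fun h => haP (List.mem_of_getLast? h)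
        have hcnt0 : ((pvRunState p).1).count a = 0 :=
          List.count_eq_zero.mpr (fun h => haP ((pvMem_heads p a).mp h))
        refine ⟨hn, ?_, ?_, ?_, ?_⟩
        · intro c
          rw [hm c, pvCount_heads_append, if_neg hlastne]
          by_cases hca : c = a
          · subst hca
            refine iff_of_false h2 ?_
            rw [hcnt0]
            split_ifs <;> omega
          · simp [hca]
        · intro c
          rw [PySem.Dict.contains_insert]
          by_cases hca : c = a
          · subst hca; simp
          · simp [hca, hc c]
        · intro c v
          rw [PySem.Dict.get?_insert]
          split_ifs with hca
          · intro hv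
            rw [hlen]
            exact le_of_eq (Option.some.inj hv).symm
          · intro hv
            have := hb c v hv
            rw [hlen]; omega
        · intro c
          rw [PySem.Dict.get?_insert, hlen]
          split_ifs with hca
          · subst hca
            refine iff_of_true rfl ⟨hlast', ?_⟩
            rw [pvCount_heads_append, if_neg hlastne, hcnt0]
            simp
          · refine iff_of_false ?_ ?_
            · intro hv
              have := hb c _ hv; omega
            · rintro ⟨hl, -⟩
              exact hca (by rw [hlast'] at hl; exact (Option.some.inj hl).symm)
      | some pre =>
        have haP : a ∈ p := by
          have h' := hc a
          rw [PySem.Dict.contains_eq_isSome_get?, hga] at h'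
          simpa using h'.symm
        have hcnt1 : ((pvRunState p).1).count a = 1 := by
          have h1 : 0 < ((pvRunState p).1).count a :=
            List.count_pos_iff.mpr ((pvMem_heads p a).mpr haP)
          omega
        have hpreb : pre ≤ (p.length : Int) - 1 := hb a pre hga
        show pvInvA (p ++ [a])
          (if (pre == (p.length : Int) - 1) = true then (st.1, st.2.insert a ↑p.length)
           else (st.1 ++ [a], st.2))
        by_cases hpre : pre = (p.length : Int) - 1
        · -- previous index is i-1: update dic[alpha] = i
          rw [if_pos (by simpa using hpre)]
          have hlasta : p.getLast? = some a := by
            have := (he a).mp (by rw [hga, hpre])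
            exact this.1
          refine ⟨hn, ?_, ?_, ?_, ?_⟩
          · intro c
            rw [hm c, pvCount_heads_append, if_pos hlasta]
            simp
          · intro c
            rw [PySem.Dict.contains_insert]
            by_cases hca : c = a
            · subst hca; simp
            · simp [hca, hc c]
          · intro c v
            rw [PySem.Dict.get?_insert]
            split_ifs with hca
            · intro hv
              rw [hlen]
              exact le_of_eq (Option.some.inj hv).symm
            · intro hv
              have := hb c v hv
              rw [hlen]; omega
          · intro c
            rw [PySem.Dict.get?_insert, hlen]
            split_ifs with hca
            · subst hca
              refine iff_of_true rfl ⟨hlast', ?_⟩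
              rw [pvCount_heads_append, if_pos hlasta]
              omega
            · refine iff_of_false ?_ ?_
              · intro hv
                have := hb c _ hv; omega
              · rintro ⟨hl, -⟩
                exact hca (by rw [hlast'] at hl; exact (Option.some.inj hl).symm)
        · -- non-adjacent repeat: append alpha to answer
          rw [if_neg (by simpa using hpre)]
          have hlastne : p.getLast? ≠ some a := by
            intro hl
            have := (he a).mpr ⟨hl, hcnt1⟩
            rw [hga] at this
            exact hpre (Option.some.inj this)
          refine ⟨?_, ?_, ?_, ?_, ?_⟩
          · rw [List.nodup_append]
            refine ⟨hn, List.nodup_singleton a, ?_⟩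
            intro x hx y hy
            rw [List.mem_singleton] at hy
            subst hy
            exact fun hxy => hmem (hxy ▸ hx)
          · intro c
            rw [pvCount_heads_append, if_neg hlastne]
            by_cases hca : c = a
            · subst hca
              refine iff_of_true (by simp) (by simp [hcnt1])
            · rw [List.mem_append]
              simp only [List.mem_singleton, hca, or_false]
              simpa [hca] using hm c
          · intro c
            rw [hc c]
            by_cases hca : c = a
            · subst hca; simp [haP]
            · simp [hca]
          · intro c v hv
            have := hb c v hv
            rw [hlen]; omega
          · intro c
            rw [hlen]
            refine iff_of_false ?_ ?_
            · intro hv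
              have := hb c _ hv; omega
            · rintro ⟨hl, hcnt⟩
              have hca : c = a := by rw [hlast'] at hl; exact (Option.some.inj hl).symm
              subst hca
              rw [pvCount_heads_append, if_neg hlastne, if_pos rfl] at hcnt
              omega

theorem pvAnswer_perm (l : List Char) :
    (((PySem.List.enumerate l 0).foldl pvStepA ([], PySem.Dict.empty)).1).Perm
      ((((pvRunState l).1.foldl (fun d c => d.insert c (d.getD c 0 + 1)) PySem.Dict.empty : PySem.Dict Char Int).keys).filter
        (fun c => 2 ≤ ((pvRunState l).1.foldl (fun d c => d.insert c (d.getD c 0 + 1)) PySem.Dict.empty : PySem.Dict Char Int).getD c 0)) := by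
  obtain ⟨hn, hm, -, -, -⟩ := pvInvA_fold l
  have hkeys : ((pvRunState l).1.foldl (fun d c => d.insert c (d.getD c 0 + 1)) PySem.Dict.empty : PySem.Dict Char Int).keys
      = PySem.Set.ofList (pvRunState l).1 := by
    rw [PySem.Dict.keys_foldl_insert, PySem.Dict.keys_empty, PySem.Set.ofList_eq_foldl]
    rfl
  have hgetD : ∀ c, ((pvRunState l).1.foldl (fun d c => d.insert c (d.getD c 0 + 1)) PySem.Dict.empty : PySem.Dict Char Int).getD c 0
      = ((pvRunState l).1.count c : Int) := by
    intro c
    rw [PySem.Dict.getD_foldl_insert_add_one, PySem.Dict.getD_empty, zero_add]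
  have hfnd : ((((pvRunState l).1.foldl (fun d c => d.insert c (d.getD c 0 + 1)) PySem.Dict.empty : PySem.Dict Char Int).keys).filter
        (fun c => 2 ≤ ((pvRunState l).1.foldl (fun d c => d.insert c (d.getD c 0 + 1)) PySem.Dict.empty : PySem.Dict Char Int).getD c 0)).Nodup := by
    rw [hkeys]
    exact (PySem.Set.nodup_ofList (pvRunState l).1).filter _
  rw [List.perm_ext_iff_of_nodup hn hfnd]
  intro c
  rw [hm c, List.mem_filter, hkeys, PySem.Set.mem_ofList, hgetD c]
  constructor
  · intro h
    refine ⟨List.count_pos_iff.mp (by omega), by exact_mod_cast decide_eq_true (by exact_mod_cast h)⟩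
  · rintro ⟨-, h⟩
    have := of_decide_eq_true h
    exact_mod_cast this

-- ===== VERDICT (by name: the statement is the Claim_ definition above) =====
theorem solution_spec : Claim_equal_solution := by
  unfold Claim_equal_solution
  intro s _
  unfold Spec_solution solution solution_alt
  simp only []
  have hperm := pvAnswer_perm s.toList
  have hsorted := PySem.List.sorted_eq_sorted_of_perm _ _ (fun x => x) (fun _ _ h => h) hperm
  rw [hsorted, PySem.List.foldl_append_singleton, PySem.Chars.join_nil_singletons, List.nil_append]
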